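-- pv_equiv track=rewrite | github.com/quangdang46/HK1 | DK-KDK/test.py | req6
-- ===== SOURCE A (Python) =====
-- def req6(message, x, y, z):  # KHONG XOA
--     kqreq6 =""
--     for i in message:
--         if x>=0 and x<=9 and y>=0 and y<=9 and z>=0 and z<=9:
--             kqreq6 += chr(ord(i)^abs(x**2-y**2-z))
--         else:
--             break;
--     return kqreq6
-- ===== SOURCE B (Python) =====
-- def req6(message, x, y, z):  # KHONG XOA
--     if not (0 <= x <= 9 and 0 <= y <= 9 and 0 <= z <= 9):
--         return ""
--     val = abs(x**2 - y**2 - z)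
--     table = {ord(c): ord(c) ^ val for c in message}
--     return message.translate(table)
-- ===== Notes on version B (the rewrite author's own statement) =====
-- stated objective: idiomatic
-- what changed: Validate the parameters once up front (returning '' when invalid, which reproduces A's break-on-first-char) and compute the XOR key once, then build a translation table {ord(c): ord(c)^val} and apply str.translate, instead of A's char-by-char accumulation loop that re-tests the full parameter guard on every iteration.
import Mathlib
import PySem

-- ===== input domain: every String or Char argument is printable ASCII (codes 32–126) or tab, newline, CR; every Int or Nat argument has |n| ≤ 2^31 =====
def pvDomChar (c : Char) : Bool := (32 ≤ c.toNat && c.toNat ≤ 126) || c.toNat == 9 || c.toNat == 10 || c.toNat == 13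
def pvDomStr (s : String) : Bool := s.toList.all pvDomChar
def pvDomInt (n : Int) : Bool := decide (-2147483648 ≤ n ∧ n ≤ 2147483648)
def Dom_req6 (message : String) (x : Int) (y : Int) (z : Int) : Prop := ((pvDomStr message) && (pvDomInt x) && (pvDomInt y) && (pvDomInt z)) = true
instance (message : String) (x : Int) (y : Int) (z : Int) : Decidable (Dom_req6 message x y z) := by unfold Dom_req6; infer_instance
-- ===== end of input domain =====

-- B validates the parameters once and XORs via a translation table (dict built from the
-- message) instead of A's accumulation loop that re-tests the guard each character; same
-- return value everywhere (objective: idiomatic).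

-- ===== PORT A =====
-- the loop body: the guard is re-tested for every character; 'break' returns the accumulator
def req6Loop (x y z : Int) (chars : List Char) (acc : String) : String :=
  match chars with
  | [] => acc
  | c :: rest =>
    if x ≥ 0 ∧ x ≤ 9 ∧ y ≥ 0 ∧ y ≤ 9 ∧ z ≥ 0 ∧ z ≤ 9 then
      req6Loop x y z rest (acc.push (Char.ofNat (c.toNat ^^^ (x ^ 2 - y ^ 2 - z).natAbs)))
    else acc

def req6 (message : String) (x : Int) (y : Int) (z : Int) : String :=
  req6Loop x y z message.toList ""

-- ===== PORT B =====
-- str.translate: look each char's code up in the table, keep the char if absent (never here)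
def req6_alt (message : String) (x : Int) (y : Int) (z : Int) : String :=
  if ¬ (0 ≤ x ∧ x ≤ 9 ∧ 0 ≤ y ∧ y ≤ 9 ∧ 0 ≤ z ∧ z ≤ 9) then ""
  else
    let val : Nat := (x ^ 2 - y ^ 2 - z).natAbs
    let table : PySem.Dict Nat Nat :=
      message.toList.foldl (fun d c => d.insert c.toNat (c.toNat ^^^ val)) PySem.Dict.empty
    String.ofList (message.toList.map (fun c =>
      match table.get? c.toNat with
      | some n => Char.ofNat n
      | none => c))

-- ===== PRECONDITION & SPEC =====
def Spec_req6 (message : String) (x : Int) (y : Int) (z : Int) (out : String) : Prop := out = req6_alt message x y z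
instance (message : String) (x : Int) (y : Int) (z : Int) (out : String) : Decidable (Spec_req6 message x y z out) := by unfold Spec_req6; infer_instance

-- ===== CLAIM (what is proved, stated in full; the proofs are below) =====
def Claim_equal_req6 : Prop := ∀ (message : String) (x : Int) (y : Int) (z : Int), Dom_req6 message x y z → Spec_req6 message x y z (req6 message x y z)

-- ===== LEMMAS AND PROOFS =====

-- the fold that builds B's table maps every key c.toNat (c ∈ l) to c.toNat ^^^ val
theorem req6_table_get (l : List Char) (val : Nat) (d : PySem.Dict Nat Nat) (k : Nat) :
    (l.foldl (fun d c => d.insert c.toNat (c.toNat ^^^ val)) d).get? k =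
      if (∃ c ∈ l, c.toNat = k) then some (k ^^^ val) else d.get? k := by
  induction l generalizing d with
  | nil => simp
  | cons c rest ih =>
    simp only [List.foldl_cons, ih, PySem.Dict.get?_insert]
    by_cases hr : ∃ c' ∈ rest, c'.toNat = k
    · have hcons : ∃ c' ∈ c :: rest, c'.toNat = k :=
        hr.imp fun c' h => ⟨List.mem_cons_of_mem _ h.1, h.2⟩
      simp [hr]
    · by_cases hc : k = c.toNat
      · have hcons : ∃ c' ∈ c :: rest, c'.toNat = k := ⟨c, List.mem_cons_self, hc.symm⟩
        simp [hc]
      · have hcons : ¬ ∃ c' ∈ c :: rest, c'.toNat = k := by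
          rintro ⟨c', hm, he⟩
          rcases List.mem_cons.1 hm with rfl | hm
          · exact hc he.symm
          · exact hr ⟨c', hm, he⟩
        simp only [hr, hcons, hc, if_false]

-- A's loop, when the guard holds, appends the XOR-image of the remaining characters
theorem req6Loop_valid (x y z : Int)
    (h : x ≥ 0 ∧ x ≤ 9 ∧ y ≥ 0 ∧ y ≤ 9 ∧ z ≥ 0 ∧ z ≤ 9) (l : List Char) :
    ∀ acc : String, req6Loop x y z l acc =
      acc ++ String.ofList (l.map (fun c => Char.ofNat (c.toNat ^^^ (x ^ 2 - y ^ 2 - z).natAbs))) := by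
  induction l with
  | nil => intro acc; apply String.ext; simp [req6Loop]
  | cons c rest ih =>
    intro acc
    simp only [req6Loop, if_pos h, ih, List.map_cons]
    apply String.ext
    simp [String.toList_push]

-- ===== VERDICT (by name: the statement is the Claim_ definition above) =====
theorem req6_spec : Claim_equal_req6 := by
  intro message x y z _
  unfold Spec_req6 req6 req6_alt
  by_cases h : x ≥ 0 ∧ x ≤ 9 ∧ y ≥ 0 ∧ y ≤ 9 ∧ z ≥ 0 ∧ z ≤ 9
  · have h' : 0 ≤ x ∧ x ≤ 9 ∧ 0 ≤ y ∧ y ≤ 9 ∧ 0 ≤ z ∧ z ≤ 9 := h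
    rw [req6Loop_valid x y z h message.toList, if_neg (by simpa using h')]
    apply String.ext
    simp only [String.toList_append, String.toList_ofList, String.toList_empty, List.nil_append]
    refine List.map_congr_left fun c hc => ?_
    rw [req6_table_get]
    simp [show ∃ c' ∈ message.toList, c'.toNat = c.toNat from ⟨c, hc, rfl⟩]
  · have h' : ¬ (0 ≤ x ∧ x ≤ 9 ∧ 0 ≤ y ∧ y ≤ 9 ∧ 0 ≤ z ∧ z ≤ 9) := h
    rw [if_pos (by simpa using h')]
    cases hm : message.toList with
    | nil => simp [req6Loop]
    | cons c rest => simp [req6Loop, if_neg h]
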